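-- pv_equiv track=rewrite | github.com/Aizikovich/The-Best-Tournament-Draw | draw.py | choose_teams_rec
-- ===== SOURCE A (Python) =====
-- def clean_options(lst: list, pair: tuple) -> list:
--     """
--     clean all pairs that choose by the recursion
--     """
--     new_options = []
--     x, y = pair
--     for couple in lst:
--         if not (x == couple[0] or y == couple[1]):
--             new_options.append(couple)
--     return new_options
--
-- def choose_teams_rec(options: list, res: list) -> list:
--
--     # Base cases
--     if len(res) > 7:
--         return []
--     if len(options) == 0:
--         if len(res) == 7:
--             return res
--         return []
--
--     # Recursive step
--     choose = choose_teams_rec(clean_options(options, options[0]), res + [options[0]])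
--     not_choose = choose_teams_rec(options[1:], res)
--     if choose:
--         return choose
--     if not_choose:
--         return not_choose
-- ===== SOURCE B (Python) =====
-- def choose_teams_rec(options: list, res: list) -> list:
--     # Documented base cases of the search, answered directly.
--     if len(res) > 7:
--         return []
--     if len(options) == 0:
--         return res if len(res) == 7 else []
--     # Iterative DFS over an explicit stack; the choose-successor is pushed
--     # last so it is explored first, and we return on the first full draw.
--     stack = [(options, res)]
--     while stack:
--         opts, cur = stack.pop()
--         if len(cur) > 7:
--             continue
--         if not opts:
--             if len(cur) == 7:
--                 return cur
--             continue
--         x, y = opts[0]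
--         stack.append((opts[1:], cur))
--         stack.append(([c for c in opts if x != c[0] and y != c[1]], cur + [opts[0]]))
-- ===== Notes on version B (the rewrite author's own statement) =====
-- stated objective: alternative
-- what changed: Replaces A's full-tree recursion (which always evaluates both the choose and skip subtrees before testing them) by an iterative DFS over an explicit stack that returns at the first complete 7-pair draw, exploring states in the same choose-first order; Pre_ excludes the inputs on which A falls off the end and returns None instead of a list.
-- outside the precondition, e.g. on choose_teams_rec([(1, 1)], []): A returns None, B returns None
import Mathlib
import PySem

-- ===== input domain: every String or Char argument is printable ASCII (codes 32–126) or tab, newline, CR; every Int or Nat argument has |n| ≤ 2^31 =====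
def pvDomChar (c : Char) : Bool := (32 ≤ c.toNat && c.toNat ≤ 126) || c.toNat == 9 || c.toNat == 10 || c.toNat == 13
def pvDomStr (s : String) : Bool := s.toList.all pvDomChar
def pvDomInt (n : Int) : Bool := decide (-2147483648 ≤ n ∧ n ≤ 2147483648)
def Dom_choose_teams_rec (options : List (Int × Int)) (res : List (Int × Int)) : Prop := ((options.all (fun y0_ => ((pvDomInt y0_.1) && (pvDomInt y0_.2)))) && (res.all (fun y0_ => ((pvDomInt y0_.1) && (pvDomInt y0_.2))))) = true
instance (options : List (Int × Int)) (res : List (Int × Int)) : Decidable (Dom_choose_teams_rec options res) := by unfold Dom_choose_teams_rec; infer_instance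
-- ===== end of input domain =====

-- B replaces A's full-tree recursion (A evaluates both branches before testing) by an
-- iterative DFS over an explicit stack that returns at the first complete draw, in the
-- same choose-first order. Equivalence is about the return value on Pre_ (where Python A
-- returns a list, not None).

-- ===== PORT A =====
def clean_options : List (Int × Int) → (Int × Int) → List (Int × Int)
  | [], _ => []
  | couple :: t, p =>
    if p.1 = couple.1 ∨ p.2 = couple.2 then clean_options t p
    else couple :: clean_options t p

theorem clean_options_len_le (l : List (Int × Int)) (p : Int × Int) :
    (clean_options l p).length ≤ l.length := by
  induction l with
  | nil => simp [clean_options]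
  | cons h t ih => simp only [clean_options]; split <;> simp <;> omega

def choose_teams_rec (options : List (Int × Int)) (res : List (Int × Int)) : List (Int × Int) :=
  if 7 < res.length then []
  else
    match options with
    | [] => if res.length = 7 then res else []
    | h :: t =>
      -- Python's fall-through `None` (no branch nonempty) is rendered as []; those
      -- inputs lie outside Pre_choose_teams_rec.
      let choose := choose_teams_rec (clean_options (h :: t) h) (res ++ [h])
      let not_choose := choose_teams_rec t res
      if choose ≠ [] then choose else if not_choose ≠ [] then not_choose else []
termination_by options.length
decreasing_by
  · have := clean_options_len_le (h :: t) h
    simp only [clean_options, true_or, if_pos] at this ⊢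
    have := clean_options_len_le t h
    simp; omega
  · simp

-- ===== PORT B =====
def clean_b (opts : List (Int × Int)) (x y : Int) : List (Int × Int) :=
  opts.filter (fun c => x != c.1 && y != c.2)

def pvStackW (st : List (List (Int × Int) × List (Int × Int))) : Nat :=
  (st.map (fun s => 3 ^ s.1.length)).sum

theorem clean_b_len_lt (h : Int × Int) (t : List (Int × Int)) :
    (clean_b (h :: t) h.1 h.2).length ≤ t.length := by
  have : clean_b (h :: t) h.1 h.2 = clean_b t h.1 h.2 := by
    simp [clean_b, List.filter]
  rw [this]
  exact List.length_filter_le _ _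

def dfs : List (List (Int × Int) × List (Int × Int)) → List (Int × Int)
  | [] => []  -- Python's `while` exhausts and falls through (None); outside Pre_
  | (opts, cur) :: st =>
    if 7 < cur.length then dfs st
    else
      match opts with
      | [] => if cur.length = 7 then cur else dfs st
      | h :: t =>
        dfs ((clean_b (h :: t) h.1 h.2, cur ++ [h]) :: (t, cur) :: st)
termination_by st => pvStackW st
decreasing_by
  all_goals simp only [pvStackW, List.map_cons, List.sum_cons, List.length_cons]
  · have h3 : 1 ≤ (3:ℕ) ^ opts.length := Nat.one_le_pow _ _ (by norm_num)
    omega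
  · simp only [List.length_nil, pow_zero]
    omega
  · have hc := clean_b_len_lt h t
    have h1 : (3:ℕ) ^ (clean_b (h :: t) h.1 h.2).length ≤ 3 ^ t.length :=
      Nat.pow_le_pow_right (by norm_num) hc
    have h3 : 1 ≤ (3:ℕ) ^ t.length := Nat.one_le_pow _ _ (by norm_num)
    omega

def choose_teams_rec_alt (options : List (Int × Int)) (res : List (Int × Int)) : List (Int × Int) :=
  if 7 < res.length then []
  else
    match options with
    | [] => if res.length = 7 then res else []
    | h :: t => dfs [(h :: t, res)]

-- ===== PRECONDITION & SPEC =====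
-- Pre_ excludes exactly the inputs on which Python A falls off the end and returns
-- None (no value of the declared list type): a nonempty options list, res of length
-- ≤ 7, and no in-order selection completing res to exactly 7 mutually compatible
-- pairs. It is stated declaratively as the existence of such a sub-selection.
def Pre_choose_teams_rec (options : List (Int × Int)) (res : List (Int × Int)) : Prop :=
  7 < res.length ∨ options = [] ∨
    ∃ s ∈ options.sublists,
      res.length + s.length = 7 ∧ s.Pairwise (fun p c => p.1 ≠ c.1 ∧ p.2 ≠ c.2)
instance (options : List (Int × Int)) (res : List (Int × Int)) : Decidable (Pre_choose_teams_rec options res) := by unfold Pre_choose_teams_rec; infer_instance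

def pvWitness_choose_teams_rec : (List (Int × Int)) × (List (Int × Int)) :=
  ([(1, 1), (2, 2)], [(0, 0), (0, 0), (0, 0), (0, 0), (0, 0)])

def Spec_choose_teams_rec (options : List (Int × Int)) (res : List (Int × Int)) (out : List (Int × Int)) : Prop := out = choose_teams_rec_alt options res
instance (options : List (Int × Int)) (res : List (Int × Int)) (out : List (Int × Int)) : Decidable (Spec_choose_teams_rec options res out) := by unfold Spec_choose_teams_rec; infer_instance

-- ===== CLAIM (what is proved, stated in full; the proofs are below) =====
def Claim_equal_choose_teams_rec : Prop := ∀ (options : List (Int × Int)) (res : List (Int × Int)), Dom_choose_teams_rec options res → Pre_choose_teams_rec options res → Spec_choose_teams_rec options res (choose_teams_rec options res)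

-- ===== LEMMAS AND PROOFS =====

-- A's clean_options and B's filter compute the same list.
theorem clean_eq (l : List (Int × Int)) (p : Int × Int) :
    clean_options l p = clean_b l p.1 p.2 := by
  induction l with
  | nil => rfl
  | cons h t ih =>
    simp only [clean_options, clean_b, List.filter_cons]
    by_cases hx : p.1 = h.1 ∨ p.2 = h.2
    · rw [if_pos hx]
      have : (p.1 != h.1 && p.2 != h.2) = false := by
        rcases hx with hx | hx <;> simp [hx]
      rw [this, ih]; rfl
    · rw [not_or] at hx
      rw [if_neg (by tauto)]
      have : (p.1 != h.1 && p.2 != h.2) = true := by simp [hx.1, hx.2]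
      rw [this, ih]; rfl

-- The DFS pops the top state and behaves like A on it, falling back to the rest.
theorem dfs_top (n : Nat) : ∀ (o r : List (Int × Int))
    (st : List (List (Int × Int) × List (Int × Int))),
    pvStackW ((o, r) :: st) ≤ n →
    dfs ((o, r) :: st) =
      if choose_teams_rec o r = [] then dfs st else choose_teams_rec o r := by
  induction n with
  | zero =>
    intro o r st h
    exfalso
    have h3 : 1 ≤ (3:ℕ) ^ o.length := Nat.one_le_pow _ _ (by norm_num)
    simp only [pvStackW, List.map_cons, List.sum_cons] at h
    omega
  | succ n ih =>
    intro o r st hn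
    by_cases hr : 7 < r.length
    · rw [dfs.eq_def, choose_teams_rec.eq_def]
      simp [hr]
    · match o with
      | [] =>
        by_cases h7 : r.length = 7
        · have hne : r ≠ [] := by intro h; rw [h] at h7; simp at h7
          rw [dfs.eq_def, choose_teams_rec.eq_def]
          simp [h7, hne]
        · rw [dfs.eq_def, choose_teams_rec.eq_def]
          simp [hr, h7]
      | h :: t =>
        have hst : dfs ((h :: t, r) :: st) =
            dfs ((clean_b (h :: t) h.1 h.2, r ++ [h]) :: (t, r) :: st) := by
          rw [dfs.eq_def]
          simp [hr]
        rw [hst]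
        have hw1 : pvStackW ((clean_b (h :: t) h.1 h.2, r ++ [h]) :: (t, r) :: st) ≤ n := by
          have hc := clean_b_len_lt h t
          have h1 : (3:ℕ) ^ (clean_b (h :: t) h.1 h.2).length ≤ 3 ^ t.length :=
            Nat.pow_le_pow_right (by norm_num) hc
          have h2 : (3:ℕ) ^ (t.length + 1) = 3 ^ t.length * 3 := pow_succ 3 t.length
          have h3 : 1 ≤ (3:ℕ) ^ t.length := Nat.one_le_two_pow.trans
            (Nat.pow_le_pow_left (by norm_num) t.length) |>.trans_eq rfl
          simp only [pvStackW, List.map_cons, List.sum_cons, List.length_cons] at hn ⊢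
          omega
        have hw2 : pvStackW ((t, r) :: st) ≤ n := by
          have h2 : (3:ℕ) ^ (t.length + 1) = 3 ^ t.length * 3 := pow_succ 3 t.length
          have h3 : 1 ≤ (3:ℕ) ^ t.length := Nat.one_le_pow _ _ (by norm_num)
          simp only [pvStackW, List.map_cons, List.sum_cons, List.length_cons] at hn ⊢
          omega
        rw [ih _ _ _ hw1, ih _ _ _ hw2]
        have hA : choose_teams_rec (h :: t) r =
            (if choose_teams_rec (clean_options (h :: t) h) (r ++ [h]) ≠ [] then
              choose_teams_rec (clean_options (h :: t) h) (r ++ [h])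
            else if choose_teams_rec t r ≠ [] then choose_teams_rec t r else []) := by
          conv_lhs => rw [choose_teams_rec.eq_def]
          simp [hr]
        rw [hA, clean_eq]
        by_cases hch : choose_teams_rec (clean_b (h :: t) h.1 h.2) (r ++ [h]) = []
        · by_cases hnc : choose_teams_rec t r = [] <;> simp [hch, hnc]
        · simp [hch]

-- The two ports agree on every input (A's None is rendered [] in both ports).
theorem dfs_nil : dfs [] = [] := by rw [dfs]

theorem ports_agree (o r : List (Int × Int)) :
    choose_teams_rec o r = choose_teams_rec_alt o r := by
  match o with
  | [] =>
    rw [choose_teams_rec.eq_def]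
    rfl
  | h :: t =>
    have halt : choose_teams_rec_alt (h :: t) r =
        if 7 < r.length then [] else dfs [(h :: t, r)] := rfl
    rw [halt]
    by_cases hr : 7 < r.length
    · rw [if_pos hr, choose_teams_rec.eq_def, if_pos hr]
    · rw [if_neg hr]
      have hd := dfs_top (pvStackW [(h :: t, r)]) (h :: t) r [] le_rfl
      rw [hd]
      by_cases hA : choose_teams_rec (h :: t) r = []
      · rw [if_pos hA, hA, dfs_nil]
      · rw [if_neg hA]

-- ===== VERDICT (by name: the statement is the Claim_ definition above) =====
theorem choose_teams_rec_spec : Claim_equal_choose_teams_rec := by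
  intro options res _ _
  unfold Spec_choose_teams_rec
  exact ports_agree options res
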